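-- pv_equiv track=rewrite | github.com/LuisPerez64/Prac | python/coding_challenges/leet_code/remove_sub_folders_from_the_filesystem.py | first_implementation
-- ===== SOURCE A (Python) =====
-- from typing import List
--
-- def first_implementation(folder: List[str]) -> List[str]:
--     """
--     The directories are not guaranteed to be in sorted order. Sort the input in place with heapsort O(n log n)
--     If they are then this problem goes into O(n) Time
--     Benefit of sorting time goes from O(n^2) to O(n log n).
--
--     Iterate over the sorted array finding common roots. As long as the next item's root is in the previous elt
--     remove it. i.e. ['/a'], and comparing '/a/b' need to ensure that '/a/' is what '/a/b' starts with.
--     The '/' is needed to weed out cases '/a/b/c' being seen as the subfolder for '/a/b/ca'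
--
--     Time Complexity: O(n log n)
--         if input is implied to be sorted O(n)
--     Space Complexity: O(n)
--         if the output is not taken into account O(1)
--     """
--     if not folder:
--         return []
--     from heapq import heapify, heappop
--     heapify(folder)
--     # initialize the output though it could be done in true O(1) space with peaking at
--     # the previous element in the heap but that would require a pop push
--     result = [heappop(folder)]
--
--     while folder:
--         cur = heappop(folder)
--         if not cur.startswith(result[-1] + '/'):
--             result.append(cur)
--
--     return result
-- ===== SOURCE B (Python) =====
-- def first_implementation(folder):
--     s = set(folder)
--     kept = [f for f in folder
--             if not any(ch == '/' and f[:i] in s for i, ch in enumerate(f))]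
--     return sorted(kept)
-- ===== Notes on version B (the rewrite author's own statement) =====
-- stated objective: idiomatic
-- what changed: B replaces A's heapify/heappop-in-sorted-order consumption with its compare-against-result[-1] scan by a hash-set ancestor test: it builds set(folder) once, keeps a folder iff no prefix of it ending just before a '/' is in the set (no sorting involved in the decision), and sorts only the kept folders for the output order; B also leaves the input list unmutated where A empties it.
-- outside the precondition, e.g. on first_implementation(['/a', '/a!', '/a/b']): A returns ['/a', '/a!', '/a/b'], B returns ['/a', '/a!']
import Mathlib
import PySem

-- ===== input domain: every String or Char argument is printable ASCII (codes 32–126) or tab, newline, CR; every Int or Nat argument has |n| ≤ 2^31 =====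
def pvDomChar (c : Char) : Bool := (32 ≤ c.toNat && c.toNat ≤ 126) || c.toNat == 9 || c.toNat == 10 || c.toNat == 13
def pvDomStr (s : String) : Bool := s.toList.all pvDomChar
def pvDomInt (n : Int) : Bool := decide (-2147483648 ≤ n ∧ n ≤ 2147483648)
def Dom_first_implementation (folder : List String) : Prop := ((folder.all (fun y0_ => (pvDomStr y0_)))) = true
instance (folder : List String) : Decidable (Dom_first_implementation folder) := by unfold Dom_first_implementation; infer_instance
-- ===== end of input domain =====

-- B drops the sort-then-adjacent-compare scan entirely: it builds a set of all folders and keeps a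
-- folder iff none of its '/'-boundary prefixes is in the set, sorting only the kept list (objective:
-- idiomatic). Equivalence is about the RETURN value only: A empties the input list in place
-- (heapify + heappop to exhaustion) while B leaves it unchanged.

-- ===== PORT A =====
-- heapify + heappop-to-exhaustion yields the elements in sorted order; ported via
-- PySem.List.sorted (stdlib call), then the while loop is the fold comparing result[-1].
def first_implementation (folder : List String) : List String :=
  if folder = [] then []
  else
    match PySem.List.sorted folder (fun x => x) false with
    | [] => []
    | h :: t =>
        t.foldl (fun result cur =>
          match PySem.List.pyGet? result (-1) with
          | some last =>
              if PySem.Str.startswith cur (last ++ "/") then result else result ++ [cur]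
          | none => result) [h]

-- ===== PORT B =====
-- Source B: s = set(folder); keep f iff no (i, ch) in enumerate(f) has ch == '/' and f[:i] in s;
-- return sorted(kept).
def first_implementation_alt (folder : List String) : List String :=
  let s : PySem.Set String := PySem.Set.ofList folder
  let kept := folder.filter (fun f =>
    !((PySem.List.enumerate f.toList 0).any (fun p =>
        p.2 == '/' && PySem.Set.contains s (PySem.Str.slice f none (some p.1)))))
  PySem.List.sorted kept (fun x => x) false

-- ===== PRECONDITION & SPEC =====
-- Pre_ excludes lists in which some folder's proper prefix ending just before a character that
-- orders below '/' (e.g. '!', space) is itself a listed folder — names outside the problem's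
-- alphabet of letters and '/', where A's sorted-adjacent compare and B's prefix-set test embody
-- two equally defensible readings of "subfolder" and can disagree.
def Pre_first_implementation (folder : List String) : Prop :=
  (folder.all (fun h => folder.all (fun g =>
    !(g.toList.isPrefixOf h.toList) ||
    ((h.toList.drop g.toList.length).head?.elim true (fun c => !(c < '/')))))) = true
instance (folder : List String) : Decidable (Pre_first_implementation folder) := by
  unfold Pre_first_implementation; infer_instance
def pvWitness_first_implementation : List String := ["/a/b", "/a", "/c/d", "/c", "/ab"]
def Spec_first_implementation (folder : List String) (out : List String) : Prop := out = first_implementation_alt folder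
instance (folder : List String) (out : List String) : Decidable (Spec_first_implementation folder out) := by unfold Spec_first_implementation; infer_instance

-- ===== CLAIM (what is proved, stated in full; the proofs are below) =====
def Claim_equal_first_implementation : Prop := ∀ (folder : List String), Dom_first_implementation folder → Pre_first_implementation folder → Spec_first_implementation folder (first_implementation folder)

-- ===== LEMMAS AND PROOFS =====

-- the universally quantified reading of Pre_ used by the proofs
def pvPreP (folder : List String) : Prop :=
  ∀ h ∈ folder, ∀ g ∈ folder, ∀ c ∈ (h.toList.drop g.toList.length).head?,
    g.toList <+: h.toList → ¬ c < '/'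

theorem pv_pre_prop (folder : List String) (hp : Pre_first_implementation folder) :
    pvPreP folder := by
  intro x hx g hg c hc hpref
  unfold Pre_first_implementation at hp
  rw [List.all_eq_true] at hp
  have h1 := List.all_eq_true.mp (hp x hx) g hg
  rcases (Bool.or_eq_true _ _).mp h1 with hfalse | helim
  · rw [Bool.not_eq_true'] at hfalse
    exact absurd hpref (by rw [← List.isPrefixOf_iff_prefix, hfalse]; simp)
  · rw [Option.mem_def.mp hc] at helim
    simpa using helim

-- 'g is an ancestor folder of f': g ++ '/' is a string prefix of f.
def pvAnc (g f : String) : Prop := (g.toList ++ ['/']) <+: f.toList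

-- 'f survives B's test': no listed folder is an ancestor of f.
def pvKeep (folder : List String) (f : String) : Prop := ∀ g ∈ folder, ¬ pvAnc g f

-- Bool form of pvKeep (for List.filter)
def pvKeepB (folder : List String) (f : String) : Bool :=
  folder.all (fun g => !((g.toList ++ ['/']).isPrefixOf f.toList))

theorem pvKeepB_eq (folder : List String) (f : String) :
    pvKeepB folder f = true ↔ pvKeep folder f := by
  simp only [pvKeepB, pvKeep, pvAnc, List.all_eq_true, Bool.not_eq_true',
    ← Bool.not_eq_true]
  constructor
  · intro h g hg hp
    exact absurd (List.isPrefixOf_iff_prefix.mpr hp) (by simpa using h g hg)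
  · intro h g hg
    simpa using fun hp => h g hg (List.isPrefixOf_iff_prefix.mp hp)

-- the runs recursion that A's fold computes (proof helper)
def pvAltRuns : List String → List String
  | [] => []
  | root :: rest =>
      root :: pvAltRuns (rest.dropWhile (fun x => PySem.Str.startswith x (root ++ "/")))
termination_by s => s.length
decreasing_by
  simpa using Nat.lt_succ_of_le (List.length_dropWhile_le _ _)

-- A's scan keeps 'cur' iff it does not extend result[-1] + '/': between two kept elements it
-- skips exactly the run of extensions of the last kept one — the dropWhile of the runs recursion.
theorem pv_fold_eq_runs (t : List String) :
    ∀ (acc : List String) (root : String),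
      t.foldl (fun result cur =>
          match PySem.List.pyGet? result (-1) with
          | some last =>
              if PySem.Str.startswith cur (last ++ "/") then result else result ++ [cur]
          | none => result) (acc ++ [root])
      = acc ++ root :: pvAltRuns (t.dropWhile (fun x => PySem.Str.startswith x (root ++ "/"))) := by
  induction t with
  | nil => intro acc root; simp [pvAltRuns]
  | cons c t ih =>
      intro acc root
      simp only [List.foldl_cons, PySem.List.pyGet?_neg_one_append_singleton,
        List.dropWhile_cons]
      by_cases h : PySem.Str.startswith c (root ++ "/") = true
      · rw [if_pos h, if_pos h]
        exact ih acc root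
      · rw [if_neg h, if_neg h]
        have hthis := ih (acc ++ [root]) c
        have hap : (acc ++ [root]) ++ [c] = acc ++ [root, c] := by simp
        rw [hap] at hthis
        have hruns : pvAltRuns (c :: t)
            = c :: pvAltRuns (t.dropWhile (fun x => PySem.Str.startswith x (c ++ "/"))) := by
          simp [pvAltRuns]
        rw [hruns, hap, hthis]
        simp

theorem pv_slice_take (f : String) (k : Nat) :
    (PySem.Str.slice f none (some (k : Int))).toList = f.toList.take k := by
  simp [PySem.Str.toList_slice, PySem.List.slice_to_natCast]

theorem pv_startswith_anc (x root : String) :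
    PySem.Str.startswith x (root ++ "/") = true ↔ pvAnc root x := by
  rw [PySem.Str.startswith_eq, PySem.Chars.startswith_iff]; unfold pvAnc; simp
theorem pv_lt_append (g : List Char) (c : Char) (t : List Char) : g < g ++ c :: t := by
  induction g with
  | nil => exact List.nil_lt_cons c t
  | cons a g ih => exact List.cons_lt_cons_iff.mpr (Or.inr ⟨rfl, ih⟩)
theorem pv_anc_lt (g f : String) (h : pvAnc g f) : g < f := by
  rw [String.lt_iff_toList_lt]
  obtain ⟨t, ht⟩ := h
  rw [← ht, List.append_assoc]
  exact pv_lt_append _ _ _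
theorem pv_between (g : List Char) : ∀ (h t : List Char), ¬ h < g → h < g ++ '/' :: t →
    ∃ r, h = g ++ r ∧ (r = [] ∨ ∃ c r', r = c :: r' ∧ c ≤ '/') := by
  induction g with
  | nil =>
      intro h t _ hlt
      refine ⟨h, by simp, ?_⟩
      cases h with
      | nil => exact Or.inl rfl
      | cons c r' =>
          rcases List.cons_lt_cons_iff.mp hlt with hc | ⟨hc, _⟩
          · exact Or.inr ⟨c, r', rfl, le_of_lt hc⟩
          · exact Or.inr ⟨c, r', rfl, le_of_eq hc⟩
  | cons a g ih =>
      intro h t hle hlt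
      cases h with
      | nil => exact absurd (List.nil_lt_cons a g) hle
      | cons b h' =>
          rcases List.cons_lt_cons_iff.mp hlt with hb | ⟨hb, hlt'⟩
          · exact absurd (List.cons_lt_cons_iff.mpr (Or.inl hb)) hle
          · subst hb
            have hle' : ¬ h' < g := fun hl => hle (List.cons_lt_cons_iff.mpr (Or.inr ⟨rfl, hl⟩))
            obtain ⟨r, hr, hd⟩ := ih h' t hle' hlt'
            exact ⟨r, by rw [List.cons_append, hr], hd⟩

-- no B-kept folder is an ancestor of the head of the remaining suffix
theorem pv_no_kept_anc (folder : List String) (hpre : pvPreP folder)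
    (root h : String) (t' rest' : List String)
    (hrootf : root ∈ folder) (hhf : h ∈ folder)
    (hKroot : pvKeep folder root)
    (hroot_le : root ≤ h)
    (hnp : ¬ pvAnc root h)
    (hrest' : rest' = h :: t')
    (hloc : ∀ g ∈ folder, g ≤ root ∨ g = root ∨ (pvAnc root g) ∨ g ∈ rest')
    (hpw' : rest'.Pairwise (· ≤ ·)) :
    ∀ g ∈ folder, pvKeep folder g → ¬ pvAnc g h := by
  intro g hgf hKg hanc
  obtain ⟨t0, ht0⟩ := hanc
  rcases lt_trichotomy g root with hglt | hgeq | hggt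
  · -- g < root
    rcases eq_or_lt_of_le hroot_le with hre | hrlt
    · exact hKroot g hgf (hre ▸ ⟨t0, ht0⟩)
    · have hnl : ¬ root.toList < g.toList := fun hl =>
        (not_lt_of_gt hglt) (String.lt_iff_toList_lt.mpr hl)
      have hlt2 : root.toList < g.toList ++ '/' :: t0 := by
        have : h.toList = g.toList ++ '/' :: t0 := by rw [← ht0]; simp
        rw [← this]
        exact String.lt_iff_toList_lt.mp hrlt
      obtain ⟨r, hr, hd⟩ := pv_between g.toList root.toList t0 hnl hlt2
      rcases hd with hnil | ⟨c, r', hrr, hcle⟩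
      · rw [hnil, List.append_nil] at hr
        exact absurd (String.toList_inj.mp hr).symm (ne_of_lt hglt)
      · rcases eq_or_lt_of_le hcle with hceq | hclt
        · -- c = '/', so root extends g ++ '/': g is an ancestor of root
          apply hKroot g hgf
          refine ⟨r', ?_⟩
          rw [hr, hrr, hceq]
          simp
        · -- c < '/', excluded by Pre_
          refine hpre root hrootf g hgf c ?_ ⟨r, hr.symm⟩ hclt
          rw [hr, hrr, List.drop_append_of_le_length (by simp)]
          simp
  · exact hnp (hgeq ▸ ⟨t0, ht0⟩)
  · -- root < g
    rcases hloc g hgf with hle | heq | hancrg | hmem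
    · exact absurd hle (not_le_of_gt hggt)
    · exact absurd heq (ne_of_gt hggt)
    · exact hKg root hrootf hancrg
    · rw [hrest'] at hmem
      rcases List.mem_cons.mp hmem with rfl | hmem
      · have hl := congrArg List.length ht0
        simp only [List.length_append, List.length_cons, List.length_nil] at hl
        omega
      · have hhg : h ≤ g := (List.pairwise_cons.mp (hrest' ▸ hpw')).1 g hmem
        exact absurd (pv_anc_lt g h ⟨t0, ht0⟩) (not_lt_of_ge hhg)

-- the head of the remaining suffix survives B's test (shortest-ancestor descent)
theorem pv_head_kept (folder : List String) (hpre : pvPreP folder)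
    (root h : String) (t' rest' : List String)
    (hrootf : root ∈ folder) (hhf : h ∈ folder)
    (hKroot : pvKeep folder root)
    (hroot_le : root ≤ h)
    (hnp : ¬ pvAnc root h)
    (hrest' : rest' = h :: t')
    (hloc : ∀ g ∈ folder, g ≤ root ∨ g = root ∨ (pvAnc root g) ∨ g ∈ rest')
    (hpw' : rest'.Pairwise (· ≤ ·)) :
    pvKeep folder h := by
  have key := pv_no_kept_anc folder hpre root h t' rest' hrootf hhf hKroot hroot_le hnp hrest' hloc hpw'
  have main : ∀ m, ∀ g ∈ folder, g.toList.length < m → ¬ pvAnc g h := by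
    intro m
    induction m with
    | zero => intro g _ hl; omega
    | succ m ih =>
        intro g hgf hl hanc
        by_cases hK : pvKeep folder g
        · exact key g hgf hK hanc
        · unfold pvKeep at hK
          push Not at hK
          obtain ⟨g', hg'f, hanc'⟩ := hK
          have hlen : g'.toList.length < g.toList.length := by
            obtain ⟨u, hu⟩ := hanc'
            have := congrArg List.length hu
            simp only [List.length_append, List.length_cons, List.length_nil] at this
            omega
          refine ih g' hg'f (by omega) ?_
          obtain ⟨u, hu⟩ := hanc'
          obtain ⟨v, hv⟩ := hanc
          refine ⟨u ++ '/' :: v, ?_⟩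
          rw [← hv, ← hu]
          simp
  intro g hgf
  exact main (g.toList.length + 1) g hgf (by omega)


theorem pv_runs_eq_filter (folder : List String) (hpre : pvPreP folder) :
    ∀ n (S' : List String), S'.length ≤ n →
      (∀ x ∈ S', x ∈ folder) →
      S'.Pairwise (· ≤ ·) →
      (∀ root ∈ S'.head?, pvKeep folder root ∧ (∀ g ∈ folder, g ≤ root ∨ g ∈ S')) →
      pvAltRuns S' = S'.filter (fun f => pvKeepB folder f) := by
  intro n
  induction n with
  | zero =>
      intro S' hlen _ _ _
      have : S' = [] := List.length_eq_zero_iff.mp (by omega)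
      subst this; simp [pvAltRuns]
  | succ n ih =>
      intro S' hlen hsub hpw hhead
      cases S' with
      | nil => simp [pvAltRuns]
      | cons root rest =>
          obtain ⟨hKroot, hloc0⟩ := hhead root (by simp)
          have hrootf : root ∈ folder := hsub root (by simp)
          have hpwc := List.pairwise_cons.mp hpw
          set p : String → Bool := fun x => PySem.Str.startswith x (root ++ "/") with hp
          have hsplit : rest = rest.takeWhile p ++ rest.dropWhile p :=
            (List.takeWhile_append_dropWhile).symm
          have hrunF : ∀ x ∈ rest.takeWhile p, ¬ (pvKeepB folder x = true) := by
            intro x hx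
            have hpx : p x = true := List.mem_takeWhile_imp hx
            rw [hp] at hpx
            have hanc : pvAnc root x := (pv_startswith_anc x root).mp hpx
            rw [pvKeepB_eq]
            intro hK
            exact hK root hrootf hanc
          have hstep : pvAltRuns (root :: rest)
              = root :: pvAltRuns (rest.dropWhile p) := by
            simp [pvAltRuns, hp]
          rw [hstep]
          have hfilter : (root :: rest).filter (fun f => pvKeepB folder f)
              = root :: (rest.dropWhile p).filter (fun f => pvKeepB folder f) := by
            rw [List.filter_cons, if_pos ((pvKeepB_eq _ _).mpr hKroot)]
            congr 1
            conv_lhs => rw [hsplit]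
            rw [List.filter_append, List.filter_eq_nil_iff.mpr hrunF, List.nil_append]
          rw [hfilter]
          congr 1
          have hsub' : ∀ x ∈ rest.dropWhile p, x ∈ folder := by
            intro x hx
            exact hsub x (List.mem_cons_of_mem _ ((List.dropWhile_sublist p).subset hx))
          have hpw' : (rest.dropWhile p).Pairwise (· ≤ ·) :=
            hpwc.2.sublist (List.dropWhile_sublist p)
          refine ih (rest.dropWhile p) ?_ hsub' hpw' ?_
          · have := List.length_dropWhile_le p rest
            simp only [List.length_cons] at hlen; omega
          · intro h hh
            cases hrest' : rest.dropWhile p with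
            | nil => rw [hrest'] at hh; simp at hh
            | cons h0 t' =>
                rw [hrest'] at hh
                have hh2 : h0 = h := Option.some.inj hh
                subst hh2
                have hhdw : h0 ∈ rest.dropWhile p := by rw [hrest']; simp
                have hhrest : h0 ∈ rest := (List.dropWhile_sublist p).subset hhdw
                have hhf : h0 ∈ folder := hsub h0 (List.mem_cons_of_mem _ hhrest)
                have hroot_le : root ≤ h0 := hpwc.1 h0 hhrest
                have hnp : ¬ pvAnc root h0 := by
                  intro hanc
                  have hpt : p h0 = true := by
                    rw [hp]; exact (pv_startswith_anc h0 root).mpr hanc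
                  have hne : rest.dropWhile p ≠ [] := by rw [hrest']; simp
                  have hhead0 : (rest.dropWhile p).head hne = h0 := by
                    simp [hrest']
                  have hnot := List.head_dropWhile_not p hne
                  rw [hhead0, hpt] at hnot
                  exact absurd hnot (by simp)
                have hcross : ∀ a ∈ rest.takeWhile p, ∀ b ∈ rest.dropWhile p, a ≤ b := by
                  have hpw2 := hpwc.2
                  rw [hsplit] at hpw2
                  exact fun a ha b hb => (List.pairwise_append.mp hpw2).2.2 a ha b hb
                have hloc : ∀ g ∈ folder,
                    g ≤ root ∨ g = root ∨ g ∈ rest.takeWhile p ∨ g ∈ rest.dropWhile p := by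
                  intro g hgf
                  rcases hloc0 g hgf with hle | hmem
                  · exact Or.inl hle
                  · rcases List.mem_cons.mp hmem with rfl | hmem
                    · exact Or.inr (Or.inl rfl)
                    · rw [hsplit] at hmem
                      rcases List.mem_append.mp hmem with hrun | hdrop
                      · exact Or.inr (Or.inr (Or.inl hrun))
                      · exact Or.inr (Or.inr (Or.inr hdrop))
                have hlocA : ∀ g ∈ folder, g ≤ root ∨ g = root ∨ (pvAnc root g) ∨ g ∈ (h0 :: t') := by
                  intro g hgf
                  rcases hloc g hgf with h1 | h2 | h3 | h4
                  · exact Or.inl h1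
                  · exact Or.inr (Or.inl h2)
                  · have hpg : p g = true := List.mem_takeWhile_imp h3
                    rw [hp] at hpg
                    exact Or.inr (Or.inr (Or.inl ((pv_startswith_anc g root).mp hpg)))
                  · exact Or.inr (Or.inr (Or.inr (hrest' ▸ h4)))
                have hpw'' : (h0 :: t').Pairwise (· ≤ ·) := hrest' ▸ hpw'
                constructor
                · exact pv_head_kept folder hpre root h0 t' (h0 :: t') hrootf hhf hKroot
                    hroot_le hnp rfl hlocA hpw''
                · intro g hgf
                  rcases hloc g hgf with h1 | h2 | h3 | h4
                  · exact Or.inl (le_trans h1 hroot_le)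
                  · exact Or.inl (h2 ▸ hroot_le)
                  · exact Or.inl (hcross g h3 h0 hhdw)
                  · exact Or.inr (hrest' ▸ h4)

theorem pv_any_eq (folder : List String) (f : String) :
    ((PySem.List.enumerate f.toList 0).any (fun p =>
        p.2 == '/' && PySem.Set.contains (PySem.Set.ofList folder) (PySem.Str.slice f none (some p.1))))
      = !pvKeepB folder f := by
  rcases hany : (PySem.List.enumerate f.toList 0).any (fun p =>
        p.2 == '/' && PySem.Set.contains (PySem.Set.ofList folder) (PySem.Str.slice f none (some p.1))) with _ | _
  · symm
    simp only [Bool.not_eq_false']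
    rw [pvKeepB_eq]
    intro g hg ⟨t, ht⟩
    rw [List.any_eq_false] at hany
    have hlen : ((g.toList ++ ['/']) ++ t).length = f.toList.length := by rw [ht]
    simp only [List.length_append, List.length_cons, List.length_nil] at hlen
    have hk : g.toList.length < f.toList.length := by omega
    have hmem : ((g.toList.length : Int), f.toList[g.toList.length]) ∈ PySem.List.enumerate f.toList 0 := by
      rw [PySem.List.mem_enumerate_iff]
      exact ⟨g.toList.length, hk, by simp⟩
    have hnot := hany _ hmem
    simp only [Bool.and_eq_true, beq_iff_eq] at hnot
    have hgetq : f.toList[g.toList.length]? = some '/' := by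
      rw [← ht, List.getElem?_append_left (by simp)]
      rw [List.getElem?_append_right (by simp)]
      simp
    have hget : f.toList[g.toList.length] = '/' := by
      have := List.getElem?_eq_getElem hk
      rw [this] at hgetq; exact Option.some.inj hgetq
    apply hnot
    refine ⟨hget, ?_⟩
    rw [PySem.Set.contains_iff, PySem.Set.mem_ofList]
    have hsl : PySem.Str.slice f none (some ((g.toList.length : Int))) = g := by
      apply String.toList_inj.mp
      rw [pv_slice_take, ← ht, List.append_assoc, List.take_left]
    rw [hsl]; exact hg
  · symm
    simp only [Bool.not_eq_true']
    rw [Bool.eq_false_iff, Ne, pvKeepB_eq]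
    intro hkeep
    rw [List.any_eq_true] at hany
    obtain ⟨p, hp, hcond⟩ := hany
    rw [PySem.List.mem_enumerate_iff] at hp
    obtain ⟨k, hk, rfl⟩ := hp
    simp only [Bool.and_eq_true, beq_iff_eq] at hcond
    obtain ⟨hslash, hmem⟩ := hcond
    rw [PySem.Set.contains_iff, PySem.Set.mem_ofList] at hmem
    refine hkeep _ hmem ?_
    show (_ ++ ['/']) <+: f.toList
    have htake : (PySem.Str.slice f none (some ((0:Int) + (k:Int)))).toList = f.toList.take k := by
      rw [show ((0:Int) + (k:Int)) = (k:Int) by ring, pv_slice_take]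
    rw [htake]
    have h2 : f.toList.take k ++ ['/'] = f.toList.take (k+1) := by
      rw [List.take_add_one]
      simp [List.getElem?_eq_getElem hk, hslash]
    rw [h2]
    exact List.take_prefix _ _

-- ===== VERDICT (by name: the statement is the Claim_ definition above) =====
theorem first_implementation_spec : Claim_equal_first_implementation := by
  intro folder _ hpre
  unfold Spec_first_implementation first_implementation first_implementation_alt
  simp only
  have hkept : folder.filter (fun f =>
        !((PySem.List.enumerate f.toList 0).any (fun p =>
          p.2 == '/' && PySem.Set.contains (PySem.Set.ofList folder) (PySem.Str.slice f none (some p.1)))))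
      = folder.filter (fun f => pvKeepB folder f) :=
    List.filter_congr (fun f _ => by rw [pv_any_eq folder f, Bool.not_not])
  rw [hkept]
  by_cases hf : folder = []
  · subst hf
    simp [PySem.List.sorted]
  · rw [if_neg hf]
    cases hse : PySem.List.sorted folder (fun x => x) false with
    | nil => exact absurd hse (by simpa [PySem.List.sorted_eq_nil_iff] using hf)
    | cons h t =>
        show t.foldl (fun result cur =>
            match PySem.List.pyGet? result (-1) with
            | some last =>
                if PySem.Str.startswith cur (last ++ "/") then result else result ++ [cur]
            | none => result) [h] = _
        have hfold := pv_fold_eq_runs t [] h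
        simp only [List.nil_append] at hfold
        rw [show ([h] : List String) = [] ++ [h] by simp] at hfold ⊢
        rw [hfold]
        have hruns : h :: pvAltRuns (t.dropWhile (fun x => PySem.Str.startswith x (h ++ "/")))
            = pvAltRuns (h :: t) := by simp [pvAltRuns]
        rw [hruns, ← hse]
        set S := PySem.List.sorted folder (fun x => x) false with hS
        have hperm : S.Perm folder := PySem.List.sorted_perm folder (fun x => x) false
        have hpwS : S.Pairwise (· ≤ ·) := by
          have := PySem.List.sorted_pairwise folder (fun x => x)
          simpa using this
        have hmain : pvAltRuns S = S.filter (fun f => pvKeepB folder f) := by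
          refine pv_runs_eq_filter folder (pv_pre_prop folder hpre) S.length S le_rfl
            (fun x hx => hperm.subset hx) hpwS ?_
          intro root hr
          have hSr : S = root :: S.tail := by
            cases hS2 : S with
            | nil => rw [hS2] at hr; simp at hr
            | cons a b => rw [hS2] at hr; cases Option.some.inj hr; simp
          constructor
          · intro g hg hanc
            have hmin : ∀ y ∈ folder, root ≤ y := by
              intro y hy
              have := PySem.List.key_head_sorted_le (xs := folder) (key := fun x => x)
                (m := root) (t := S.tail) (by rw [← hS, ← hSr]) y hy
              simpa using this
            exact absurd (pv_anc_lt g root hanc) (not_lt_of_ge (hmin g hg))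
          · intro g hg
            exact Or.inr (hperm.symm.subset hg)
        rw [hmain]
        exact (PySem.List.sorted_id_eq_of_perm_of_pairwise _ _ (hperm.filter _)
          (hpwS.sublist List.filter_sublist)).symm
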